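-- pv_equiv track=rewrite | github.com/dsi-clinic/vanguard | features/_common.py | sanitize_feature_token
-- ===== SOURCE A (Python) =====
-- def sanitize_feature_token(token: str) -> str:
--     """Normalize nested JSON keys into stable, safe feature tokens."""
--     cleaned = []
--     for char in str(token):
--         if char.isalnum():
--             cleaned.append(char.lower())
--         else:
--             cleaned.append("_")
--     out = "".join(cleaned).strip("_")
--     while "__" in out:
--         out = out.replace("__", "_")
--     return out or "x"
-- ===== SOURCE B (Python) =====
-- def sanitize_feature_token(token: str) -> str:
--     out = []
--     for char in str(token):
--         if char.isalnum():
--             out.append(char.lower())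
--         elif out and out[-1] != "_":
--             out.append("_")
--     if out and out[-1] == "_":
--         out.pop()
--     return "".join(out) or "x"
-- ===== Notes on version B (the rewrite author's own statement) =====
-- stated objective: simpler
-- what changed: B builds the result in one left-to-right pass maintaining separator state (it appends a single underscore separator only when the output is non-empty and does not already end with one, and drops at most one trailing separator at the end), replacing A's map-every-character pipeline of strip followed by repeated whole-string double-underscore replacement scans.
import Mathlib
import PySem

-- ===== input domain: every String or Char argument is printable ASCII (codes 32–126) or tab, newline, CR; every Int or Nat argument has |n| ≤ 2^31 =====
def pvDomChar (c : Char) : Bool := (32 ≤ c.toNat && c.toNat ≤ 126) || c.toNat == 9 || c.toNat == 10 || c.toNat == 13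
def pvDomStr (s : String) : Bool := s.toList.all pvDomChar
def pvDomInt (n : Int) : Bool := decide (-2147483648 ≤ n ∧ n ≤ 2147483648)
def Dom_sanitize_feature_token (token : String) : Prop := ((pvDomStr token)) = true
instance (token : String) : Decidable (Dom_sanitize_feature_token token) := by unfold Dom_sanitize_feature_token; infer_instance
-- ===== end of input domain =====

-- B is a single pass that never creates leading/doubled separators, instead of A's build + strip + while-replace collapse.
-- ===== PORT A ===== (helpers pvRep1/pvHasDD and the lemmas below are cited by the port's decreasing_by)
def pvRep1 : List Char → List Char
  | [] => []
  | [c] => [c]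
  | a :: b :: t => if a = '_' ∧ b = '_' then '_' :: pvRep1 t else a :: pvRep1 (b :: t)

def pvHasDD : List Char → Bool
  | [] => false
  | [_] => false
  | a :: b :: t => (a = '_' && b = '_') || pvHasDD (b :: t)

lemma pvRep1_len_le (l : List Char) : (pvRep1 l).length ≤ l.length := by
  induction l using pvRep1.induct with
  | case1 => simp [pvRep1]
  | case2 c => simp [pvRep1]
  | case3 a b t h ih => simp [pvRep1, h] at ih ⊢; omega
  | case4 a b t h ih => simp [pvRep1, h] at ih ⊢; omega

lemma pvRep1_len_lt (l : List Char) (h : pvHasDD l = true) : (pvRep1 l).length < l.length := by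
  induction l using pvRep1.induct with
  | case1 => simp [pvHasDD] at h
  | case2 c => simp [pvHasDD] at h
  | case3 a b t hab ih =>
    have := pvRep1_len_le t
    simp [pvRep1, hab]; omega
  | case4 a b t hab ih =>
    have ht : pvHasDD (b :: t) = true := by
      simp [pvHasDD] at h
      rcases h with ⟨h1, h2⟩ | h
      · exact absurd ⟨h1, h2⟩ hab
      · exact h
    have h2 := ih ht
    simp only [List.length_cons] at h2
    simp [pvRep1, hab]; omega

lemma pvGo_eq (fuel : Nat) : ∀ (l acc : List Char), l.length ≤ fuel →
    PySem.Chars.replace.go ['_','_'] ['_'] fuel l acc = acc.reverse ++ pvRep1 l := by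
  induction fuel with
  | zero =>
    intro l acc h
    have : l = [] := List.eq_nil_of_length_eq_zero (by omega)
    subst this
    rw [PySem.Chars.replace.go]
    simp [pvRep1]
  | succ fuel ih =>
    intro l acc h
    cases l with
    | nil =>
      rw [PySem.Chars.replace.go]
      · simp [pvRep1]
      · omega
    | cons c t =>
      rw [PySem.Chars.replace.go]
      cases t with
      | nil =>
        have hpre : (['_','_'].isPrefixOf [c]) = false := by
          cases hc : ('_' == c) <;> simp [List.isPrefixOf, hc]
        rw [hpre]
        simp only [Bool.false_eq_true, if_false]
        rw [ih [] (c :: acc) (by simp)]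
        simp [pvRep1]
      | cons b r =>
        by_cases hcb : c = '_' ∧ b = '_'
        · have hpre : (['_','_'].isPrefixOf (c :: b :: r)) = true := by
            simp [List.isPrefixOf, hcb.1, hcb.2]
          rw [hpre]
          simp only [if_true]
          have hr : r.length ≤ fuel := by simp at h; omega
          rw [show List.drop ['_','_'].length (c :: b :: r) = r from rfl]
          rw [ih r (['_'].reverse ++ acc) hr]
          simp [pvRep1, hcb.1, hcb.2]
        · have hpre : (['_','_'].isPrefixOf (c :: b :: r)) = false := by
            simp [List.isPrefixOf]
            intro h1 h2
            exact hcb ⟨h1.symm, h2.symm⟩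
          rw [hpre]
          simp only [Bool.false_eq_true, if_false]
          rw [ih (b :: r) (c :: acc) (by simp at h ⊢; omega)]
          simp [pvRep1, hcb]

lemma pvReplace_eq_rep1 (l : List Char) : PySem.Chars.replace l ['_','_'] ['_'] = pvRep1 l := by
  rw [PySem.Chars.replace]
  simp only [List.isEmpty_cons]
  rw [pvGo_eq l.length l [] (le_refl _)]
  simp

lemma pvIsIn_eq_hasDD (l : List Char) : PySem.Chars.isIn ['_','_'] l = pvHasDD l := by
  have hiff : pvHasDD l = true ↔ ['_','_'] <:+: l := by
    induction l with
    | nil => simp [pvHasDD]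
    | cons a t ih =>
      cases t with
      | nil =>
        simp only [pvHasDD, Bool.false_eq_true, false_iff]
        intro h
        have := h.length_le
        simp at this
      | cons b r =>
        rw [List.infix_cons_iff]
        constructor
        · intro h
          simp only [pvHasDD, Bool.or_eq_true, Bool.and_eq_true, decide_eq_true_eq] at h
          rcases h with ⟨rfl, rfl⟩ | h
          · exact Or.inl ⟨r, rfl⟩
          · exact Or.inr (ih.mp h)
        · intro h
          simp only [pvHasDD, Bool.or_eq_true, Bool.and_eq_true, decide_eq_true_eq]
          rcases h with ⟨w, hw⟩ | h
          · simp at hw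
            exact Or.inl ⟨hw.1.symm, hw.2.1.symm⟩
          · exact Or.inr (ih.mpr h)
  cases hdd : pvHasDD l with
  | true => simp [(PySem.Chars.isIn_iff_infix _ _).2 (hiff.mp hdd)]
  | false =>
    rw [PySem.Chars.isIn_eq_false_iff _ _]
    intro h
    rw [hiff.mpr h] at hdd
    exact Bool.true_eq_false.mp hdd

-- the Python 'while "__" in out: out = out.replace("__", "_")' loop
def pvSqueeze (out : List Char) : List Char :=
  if PySem.Chars.isIn ['_','_'] out = true then pvSqueeze (PySem.Chars.replace out ['_','_'] ['_']) else out
termination_by out.length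
decreasing_by
  rw [pvReplace_eq_rep1]
  exact pvRep1_len_lt _ (by rwa [← pvIsIn_eq_hasDD])

def sanitize_feature_token (token : String) : String :=
  let cleaned := token.toList.foldl
    (fun acc c => if PySem.Chars.isalnum c then acc ++ [PySem.Chars.lowerChar c] else acc ++ ['_']) []
  let out := PySem.Chars.stripChars cleaned ['_']
  let out2 := pvSqueeze out
  if out2 = [] then "x" else String.mk out2

-- ===== PORT B =====
def sanitize_feature_token_alt (token : String) : String :=
  let out := token.toList.foldl
    (fun acc c =>
      if PySem.Chars.isalnum c then acc ++ [PySem.Chars.lowerChar c]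
      else if acc ≠ [] ∧ acc.getLast? ≠ some '_' then acc ++ ['_']
      else acc) []
  let out2 := if out ≠ [] ∧ out.getLast? = some '_' then out.dropLast else out
  if out2 = [] then "x" else String.mk out2

-- ===== PRECONDITION & SPEC =====
def Spec_sanitize_feature_token (token : String) (out : String) : Prop := out = sanitize_feature_token_alt token
instance (token : String) (out : String) : Decidable (Spec_sanitize_feature_token token out) := by unfold Spec_sanitize_feature_token; infer_instance

-- ===== CLAIM (what is proved, stated in full; the proofs are below) =====
def Claim_equal_sanitize_feature_token : Prop := ∀ (token : String), Dom_sanitize_feature_token token → Spec_sanitize_feature_token token (sanitize_feature_token token)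

-- ===== LEMMAS AND PROOFS =====

-- proof machinery
def pvF (c : Char) : Char := if PySem.Chars.isalnum c then PySem.Chars.lowerChar c else '_'
def pvQ (c : Char) : Bool := c == '_'
def pvG (c : Char) (acc : List Char) : List Char :=
  if c = '_' ∧ acc.head? = some '_' then acc else c :: acc
def pvCollapse (l : List Char) : List Char := l.foldr pvG []
def pvDropT (v : List Char) : List Char := if v.getLast? = some '_' then v.dropLast else v

set_option maxRecDepth 4096 in
lemma pvCharFact (c : Char) (h : pvDomChar c = true) :
    PySem.Chars.isalnum c = true → PySem.Chars.lowerChar c ≠ '_' := by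
  have hle : c.toNat ≤ 126 := by
    simp [pvDomChar] at h
    omega
  have key : ∀ n ∈ List.range 127,
      (PySem.Chars.isalnum (Char.ofNat n) = true → PySem.Chars.lowerChar (Char.ofNat n) ≠ '_') := by
    decide
  have h2 := key c.toNat (by simp [List.mem_range]; omega)
  rwa [Char.ofNat_toNat] at h2

lemma pvGG (x : List Char) : pvG '_' (pvG '_' x) = pvG '_' x := by
  by_cases hx : x.head? = some '_' <;> simp [pvG, hx]

lemma pvCL (xs : List Char) : pvCollapse ('_' :: xs) = '_' :: pvCollapse (xs.dropWhile pvQ) := by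
  induction xs with
  | nil => simp [pvCollapse, pvG]
  | cons a r ih =>
    by_cases ha : a = '_'
    · subst ha
      have l1 : pvCollapse ('_' :: '_' :: r) = pvG '_' (pvG '_' (pvCollapse r)) := rfl
      rw [l1, pvGG]
      have l2 : pvG '_' (pvCollapse r) = pvCollapse ('_' :: r) := rfl
      rw [l2, ih]
      simp [pvQ]
    · have hd : List.dropWhile pvQ (a :: r) = a :: r := by
        simp [List.dropWhile_cons, pvQ, ha]
      simp [pvCollapse, pvG, ha, hd]

lemma pvFoldA (s : List Char) : ∀ acc : List Char,
    s.foldl (fun acc c => if PySem.Chars.isalnum c then acc ++ [PySem.Chars.lowerChar c] else acc ++ ['_']) acc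
      = acc ++ s.map pvF := by
  induction s with
  | nil => intro acc; simp
  | cons c t ih =>
    intro acc
    by_cases hc : PySem.Chars.isalnum c = true <;>
      simp [List.foldl_cons, hc, pvF, ih]

lemma pvBC (s : List Char) (hs : ∀ c ∈ s, PySem.Chars.isalnum c = true → PySem.Chars.lowerChar c ≠ '_') :
    ∀ acc : List Char,
    s.foldl (fun acc c =>
      if PySem.Chars.isalnum c then acc ++ [PySem.Chars.lowerChar c]
      else if acc ≠ [] ∧ acc.getLast? ≠ some '_' then acc ++ ['_']
      else acc) acc
    = acc ++ (if acc ≠ [] ∧ acc.getLast? ≠ some '_' then pvCollapse (s.map pvF)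
              else pvCollapse ((s.map pvF).dropWhile pvQ)) := by
  revert hs
  induction s with
  | nil => intro hs acc; simp [pvCollapse]
  | cons c t ih =>
    intro hs acc
    have hst : ∀ c ∈ t, PySem.Chars.isalnum c = true → PySem.Chars.lowerChar c ≠ '_' :=
      fun d hd => hs d (List.mem_cons_of_mem _ hd)
    rw [List.foldl_cons]
    by_cases hc : PySem.Chars.isalnum c = true
    · have hlc : PySem.Chars.lowerChar c ≠ '_' := hs c List.mem_cons_self hc
      rw [if_pos hc, ih hst (acc ++ [PySem.Chars.lowerChar c])]
      have hcond : (acc ++ [PySem.Chars.lowerChar c]) ≠ [] ∧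
          (acc ++ [PySem.Chars.lowerChar c]).getLast? ≠ some '_' := by
        constructor
        · simp
        · rw [List.getLast?_concat]
          simp [hlc]
      rw [if_pos hcond]
      have hmap : (c :: t).map pvF = PySem.Chars.lowerChar c :: t.map pvF := by simp [pvF, hc]
      have hcol : pvCollapse (PySem.Chars.lowerChar c :: t.map pvF)
          = PySem.Chars.lowerChar c :: pvCollapse (t.map pvF) := by
        simp [pvCollapse, pvG, hlc]
      by_cases hacc : acc ≠ [] ∧ acc.getLast? ≠ some '_' <;>
        simp [hacc, hmap, hcol, pvQ, hlc, List.dropWhile]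
    · have hfc : pvF c = '_' := by simp [pvF, hc]
      have hmap : (c :: t).map pvF = '_' :: t.map pvF := by simp [hfc]
      rw [if_neg hc]
      by_cases hacc : acc ≠ [] ∧ acc.getLast? ≠ some '_'
      · rw [if_pos hacc, ih hst (acc ++ ['_'])]
        have hcond : ¬ ((acc ++ ['_']) ≠ [] ∧ (acc ++ ['_']).getLast? ≠ some '_') := by
          rw [List.getLast?_concat]
          simp
        rw [if_neg hcond, if_pos hacc, hmap, pvCL]
        simp
      · rw [if_neg hacc, ih hst acc, if_neg hacc, if_neg hacc, hmap]
        simp [pvQ, List.dropWhile]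

lemma pvAppNonUnd (u : List Char) (c : Char) (hc : c ≠ '_') :
    pvCollapse (u ++ [c]) = pvCollapse u ++ [c] := by
  induction u with
  | nil => simp [pvCollapse, pvG, hc]
  | cons a u ih =>
    have l1 : pvCollapse (a :: u ++ [c]) = pvG a (pvCollapse (u ++ [c])) := rfl
    have l2 : pvCollapse (a :: u) = pvG a (pvCollapse u) := rfl
    rw [l1, l2, ih]
    by_cases ha : a = '_'
    · cases hcu : pvCollapse u with
      | nil => simp [pvG, ha, hc]
      | cons y ys =>
        by_cases hy : y = '_' <;> simp [pvG, ha, hy]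
    · simp [pvG, ha]

lemma pvDropT_cons (c : Char) (x : List Char) (hx : x ≠ []) :
    pvDropT (c :: x) = c :: pvDropT x := by
  cases x with
  | nil => exact absurd rfl hx
  | cons y ys =>
    by_cases hl : (y :: ys).getLast? = some '_' <;>
      simp [pvDropT, List.getLast?_cons_cons, hl]

lemma pvDropT_head_cons (a : Char) (xs : List Char) (h : pvDropT (a :: xs) ≠ []) :
    (pvDropT (a :: xs)).head? = some a := by
  unfold pvDropT at h ⊢
  split
  next hl =>
    rw [if_pos hl] at h
    cases xs with
    | nil => simp at h
    | cons b r => simp [List.dropLast_cons₂]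
  next hl => simp

lemma pvDropT_ne_nil (a : Char) (xs : List Char) (ha : a ≠ '_') : pvDropT (a :: xs) ≠ [] := by
  unfold pvDropT
  split
  next hl =>
    cases xs with
    | nil => simp at hl; exact absurd hl ha
    | cons b r => simp [List.dropLast_cons₂]
  next hl => simp

lemma pvGDT (c : Char) (x : List Char) :
    pvG c (pvDropT x ++ ['_']) = pvDropT (pvG c x) ++ ['_'] := by
  by_cases hc : c = '_'
  · subst hc
    cases x with
    | nil => simp [pvG, pvDropT]
    | cons a xs =>
      by_cases ha : a = '_'
      · subst ha
        rw [show pvG '_' ('_' :: xs) = '_' :: xs from by simp [pvG]]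
        have hhd : (pvDropT ('_' :: xs) ++ ['_']).head? = some '_' := by
          cases hdt : pvDropT ('_' :: xs) with
          | nil => simp
          | cons y ys =>
            have := pvDropT_head_cons '_' xs (by rw [hdt]; simp)
            rw [hdt] at this
            simp at this ⊢
            simp [this]
        simp [pvG, hhd]
      · rw [show pvG '_' (a :: xs) = '_' :: a :: xs from by simp [pvG, ha]]
        rw [pvDropT_cons '_' (a :: xs) (by simp)]
        have hne := pvDropT_ne_nil a xs ha
        have h1 := pvDropT_head_cons a xs hne
        obtain ⟨ys, hdt⟩ : ∃ ys, pvDropT (a :: xs) = a :: ys := by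
          cases hdt : pvDropT (a :: xs) with
          | nil => exact absurd hdt hne
          | cons y ys =>
            rw [hdt] at h1
            simp at h1
            exact ⟨ys, by rw [h1]⟩
        rw [hdt]
        simp [pvG, ha]
  · rw [show pvG c x = c :: x from by simp [pvG, hc]]
    cases x with
    | nil => simp [pvG, pvDropT, hc]
    | cons a xs =>
      rw [pvDropT_cons c (a :: xs) (by simp)]
      rw [show pvG c (pvDropT (a :: xs) ++ ['_']) = c :: (pvDropT (a :: xs) ++ ['_']) from by
        simp [pvG, hc]]
      simp

lemma pvAppUnd (u : List Char) :
    pvCollapse (u ++ ['_']) = pvDropT (pvCollapse u) ++ ['_'] := by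
  induction u with
  | nil => simp [pvCollapse, pvG, pvDropT]
  | cons c t ih =>
    have l1 : pvCollapse (c :: t ++ ['_']) = pvG c (pvCollapse (t ++ ['_'])) := rfl
    have l2 : pvCollapse (c :: t) = pvG c (pvCollapse t) := rfl
    rw [l1, l2, ih, pvGDT]

lemma pvDropTAppUnd (y : List Char) : pvDropT (y ++ ['_']) = y := by
  simp [pvDropT, List.getLast?_concat, List.dropLast_concat]

lemma pvL (u : List Char) :
    pvDropT (pvCollapse u) = pvCollapse ((u.reverse.dropWhile pvQ).reverse) := by
  induction u using List.reverseRecOn with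
  | nil => simp [pvCollapse, pvDropT]
  | append_singleton w c ih =>
    by_cases hc : c = '_'
    · subst hc
      rw [pvAppUnd, pvDropTAppUnd]
      rw [show (w ++ ['_']).reverse = '_' :: w.reverse from by simp]
      rw [show List.dropWhile pvQ ('_' :: w.reverse) = List.dropWhile pvQ w.reverse from by
        simp [List.dropWhile_cons, pvQ]]
      exact ih
    · rw [pvAppNonUnd w c hc]
      rw [show pvDropT (pvCollapse w ++ [c]) = pvCollapse w ++ [c] from by
        simp [pvDropT, List.getLast?_concat, hc]]
      rw [show (w ++ [c]).reverse = c :: w.reverse from by simp]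
      rw [show List.dropWhile pvQ (c :: w.reverse) = c :: w.reverse from by
        simp [List.dropWhile_cons, pvQ, hc]]
      rw [show (c :: w.reverse).reverse = w ++ [c] from by simp]
      rw [pvAppNonUnd w c hc]

lemma pvR1 (t : List Char) : pvCollapse (pvRep1 t) = pvCollapse t := by
  induction t using pvRep1.induct with
  | case1 => rfl
  | case2 c => rfl
  | case3 a b t h ih =>
    rw [show pvRep1 (a :: b :: t) = '_' :: pvRep1 t from by simp [pvRep1, h]]
    rw [show pvCollapse ('_' :: pvRep1 t) = pvG '_' (pvCollapse (pvRep1 t)) from rfl, ih]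
    rw [h.1, h.2]
    rw [show pvCollapse ('_' :: '_' :: t) = pvG '_' (pvG '_' (pvCollapse t)) from rfl, pvGG]
  | case4 a b t h ih =>
    rw [show pvRep1 (a :: b :: t) = a :: pvRep1 (b :: t) from by simp [pvRep1, h]]
    rw [show pvCollapse (a :: pvRep1 (b :: t)) = pvG a (pvCollapse (pvRep1 (b :: t))) from rfl, ih]
    rfl

lemma pvR2 (t : List Char) (h : pvHasDD t = false) : pvCollapse t = t := by
  induction t using pvHasDD.induct with
  | case1 => rfl
  | case2 c => simp [pvCollapse, pvG]
  | case3 a b t ih =>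
    simp only [pvHasDD, Bool.or_eq_false_iff, Bool.and_eq_false_iff] at h
    rw [show pvCollapse (a :: b :: t) = pvG a (pvCollapse (b :: t)) from rfl, ih h.2]
    have hab : a = '_' → ¬ b = '_' := by
      rcases h.1 with h1 | h1 <;> simp at h1 <;> simp [h1]
    by_cases ha : a = '_'
    · simp [pvG, ha, hab ha]
    · simp [pvG, ha]

lemma pvWL (t : List Char) : pvSqueeze t = pvCollapse t := by
  rw [pvSqueeze]
  split
  next h =>
    rw [pvReplace_eq_rep1, pvWL (pvRep1 t), pvR1]
  next h =>
    cases hb : PySem.Chars.isIn ['_','_'] t with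
    | true => exact absurd hb h
    | false => exact (pvR2 t (by rw [← pvIsIn_eq_hasDD]; exact hb)).symm
termination_by t.length
decreasing_by
  exact pvRep1_len_lt _ (by rwa [← pvIsIn_eq_hasDD])

lemma pvStrip (s : List Char) :
    PySem.Chars.stripChars s ['_'] = (((s.dropWhile pvQ).reverse.dropWhile pvQ)).reverse := by
  have hp : (fun c => (['_'] : List Char).contains c) = pvQ := by
    funext c
    show (c == '_' || List.contains [] c) = pvQ c
    simp [pvQ]
  simp only [PySem.Chars.stripChars, hp]


-- ===== VERDICT (by name: the statement is the Claim_ definition above) =====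
theorem sanitize_feature_token_spec : Claim_equal_sanitize_feature_token := by
  intro token hdom
  unfold Spec_sanitize_feature_token
  have hs : ∀ c ∈ token.toList, PySem.Chars.isalnum c = true → PySem.Chars.lowerChar c ≠ '_' := by
    intro c hc
    apply pvCharFact c
    have hd := hdom
    unfold Dom_sanitize_feature_token pvDomStr at hd
    rw [List.all_eq_true] at hd
    exact hd c hc
  have hfoldA : token.toList.foldl
      (fun acc c => if PySem.Chars.isalnum c then acc ++ [PySem.Chars.lowerChar c] else acc ++ ['_']) []
      = token.toList.map pvF := by
    rw [pvFoldA]; simp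
  have hfoldB : token.toList.foldl
      (fun acc c =>
        if PySem.Chars.isalnum c then acc ++ [PySem.Chars.lowerChar c]
        else if acc ≠ [] ∧ acc.getLast? ≠ some '_' then acc ++ ['_']
        else acc) []
      = pvCollapse ((token.toList.map pvF).dropWhile pvQ) := by
    rw [pvBC token.toList hs []]
    simp
  have hDropT : (if pvCollapse ((token.toList.map pvF).dropWhile pvQ) ≠ [] ∧
        (pvCollapse ((token.toList.map pvF).dropWhile pvQ)).getLast? = some '_'
      then (pvCollapse ((token.toList.map pvF).dropWhile pvQ)).dropLast
      else pvCollapse ((token.toList.map pvF).dropWhile pvQ))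
      = pvDropT (pvCollapse ((token.toList.map pvF).dropWhile pvQ)) := by
    cases hv : pvCollapse ((token.toList.map pvF).dropWhile pvQ) with
    | nil => simp [pvDropT]
    | cons a w =>
      by_cases hl : (a :: w).getLast? = some '_' <;> simp [pvDropT, hl]
  unfold sanitize_feature_token sanitize_feature_token_alt
  simp only [hfoldA, hfoldB, hDropT]
  rw [pvStrip, pvWL, ← pvL]
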